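-- pv_equiv track=rewrite | github.com/normster/CS170 | solver/solver.py | penalty_overall
-- ===== SOURCE A (Python) =====
-- def penalty_overall(graph, children, solution):
--     resolved = set()
--     penalty = 0
--     for cycle in solution:
--         for node in cycle:
--             resolved.add(node)
--     for i in range(len(graph)):
--         if i not in resolved:
--             if i in children:
--                 penalty += 2
--             else:
--                 penalty += 1
--     return penalty
-- ===== SOURCE B (Python) =====
-- def penalty_overall(graph, children, solution):
--     n = len(graph)
--     # complementary counting: charge every node, then refund the resolved ones
--     total = sum(2 if i in children else 1 for i in range(n))
--     resolved = set()
--     for cycle in solution: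
--         resolved.update(cycle)
--     for r in resolved:
--         if 0 <= r < n:
--             total -= 2 if r in children else 1
--     return total
-- ===== Notes on version B (the rewrite author's own statement) =====
-- stated objective: alternative
-- what changed: Complementary counting: B first sums the penalty as if every node were unresolved, then subtracts the contribution of each in-range resolved node, instead of A's membership test per index.
import Mathlib
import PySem

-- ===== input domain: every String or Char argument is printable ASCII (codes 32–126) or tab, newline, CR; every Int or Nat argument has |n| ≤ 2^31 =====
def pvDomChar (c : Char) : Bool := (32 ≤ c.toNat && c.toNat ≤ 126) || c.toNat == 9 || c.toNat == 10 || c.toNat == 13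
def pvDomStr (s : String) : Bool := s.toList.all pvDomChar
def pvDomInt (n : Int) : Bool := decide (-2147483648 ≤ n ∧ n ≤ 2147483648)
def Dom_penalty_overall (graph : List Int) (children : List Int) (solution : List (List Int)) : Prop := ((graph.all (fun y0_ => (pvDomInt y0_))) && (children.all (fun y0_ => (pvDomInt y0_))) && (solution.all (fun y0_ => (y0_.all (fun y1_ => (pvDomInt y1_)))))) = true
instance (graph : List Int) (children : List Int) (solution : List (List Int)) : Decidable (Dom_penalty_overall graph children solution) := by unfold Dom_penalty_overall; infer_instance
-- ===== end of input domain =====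

-- B replaces A's per-index membership test by complementary counting (charge all, refund resolved); same cost class, different decomposition.

-- ===== PORT A =====
def penalty_overall (graph : List Int) (children : List Int) (solution : List (List Int)) : Int :=
  let resolved : PySem.Set Int :=
    solution.foldl (fun s cycle => cycle.foldl (fun s node => PySem.Set.add s node) s) PySem.Set.empty
  (PySem.List.pyRange 0 graph.length 1).foldl
    (fun penalty i =>
      if !(PySem.Set.contains resolved i) then
        (if children.contains i then penalty + 2 else penalty + 1)
      else penalty) 0

-- ===== PORT B =====
def penalty_overall_alt (graph : List Int) (children : List Int) (solution : List (List Int)) : Int :=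
  let n : Int := graph.length
  let total : Int :=
    (PySem.List.pyRange 0 n 1).foldl (fun t i => t + (if children.contains i then 2 else 1)) 0
  let resolved : PySem.Set Int :=
    solution.foldl (fun s cycle => PySem.Set.update s cycle) PySem.Set.empty
  resolved.foldl
    (fun t r => if 0 ≤ r ∧ r < n then t - (if children.contains r then 2 else 1) else t) total

-- ===== PRECONDITION & SPEC =====
def Spec_penalty_overall (graph : List Int) (children : List Int) (solution : List (List Int)) (out : Int) : Prop := out = penalty_overall_alt graph children solution
instance (graph : List Int) (children : List Int) (solution : List (List Int)) (out : Int) : Decidable (Spec_penalty_overall graph children solution out) := by unfold Spec_penalty_overall; infer_instance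

-- ===== CLAIM (what is proved, stated in full; the proofs are below) =====
def Claim_equal_penalty_overall : Prop := ∀ (graph : List Int) (children : List Int) (solution : List (List Int)), Dom_penalty_overall graph children solution → Spec_penalty_overall graph children solution (penalty_overall graph children solution)

-- ===== LEMMAS AND PROOFS =====

theorem nodup_resolved (solution : List (List Int)) (s : PySem.Set Int) (hs : s.Nodup) :
    (solution.foldl (fun s cycle => PySem.Set.update s cycle) s).Nodup := by
  induction solution generalizing s with
  | nil => exact hs
  | cons c cs ih =>
    simp only [List.foldl_cons]
    exact ih _ (PySem.Set.nodup_update s c hs)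

-- A's index loop as an accumulator plus a mapped sum
theorem foldlA (R children : List Int) (l : List Int) (acc : Int) :
    l.foldl (fun penalty i =>
        if !(PySem.Set.contains R i) then
          (if children.contains i then penalty + 2 else penalty + 1)
        else penalty) acc
      = acc + (l.map (fun i => if PySem.Set.contains R i then 0
            else (if children.contains i then (2:Int) else 1))).sum := by
  induction l generalizing acc with
  | nil => simp
  | cons x xs ih =>
    simp only [List.foldl_cons, List.map_cons, List.sum_cons, ih]
    by_cases h : x ∈ R <;> by_cases h2 : x ∈ children <;> simp [h, h2] <;> ring

-- B's refund loop as an accumulator minus a mapped sum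
theorem foldlB (children : List Int) (n : Int) (l : List Int) (acc : Int) :
    l.foldl (fun t r =>
        if 0 ≤ r ∧ r < n then t - (if children.contains r then 2 else 1) else t) acc
      = acc - (l.map (fun r => if decide (0 ≤ r ∧ r < n) then
            (if children.contains r then (2:Int) else 1) else 0)).sum := by
  induction l generalizing acc with
  | nil => simp
  | cons x xs ih =>
    simp only [List.foldl_cons, List.map_cons, List.sum_cons, ih]
    by_cases h : (0 ≤ x ∧ x < n) <;> by_cases h2 : x ∈ children <;> simp [h, h2] <;> ring

theorem sum_if_split (c : Int → Bool) (w : Int → Int) (l : List Int) :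
    (l.map (fun i => if c i then 0 else w i)).sum
      = (l.map w).sum - (l.map (fun i => if c i then w i else 0)).sum := by
  induction l with
  | nil => simp
  | cons x xs ih =>
    simp only [List.map_cons, List.sum_cons, ih]
    by_cases h : c x <;> simp [h] <;> ring

theorem sum_if_filter (c : Int → Bool) (w : Int → Int) (l : List Int) :
    (l.map (fun i => if c i then w i else 0)).sum = ((l.filter c).map w).sum := by
  induction l with
  | nil => simp
  | cons x xs ih =>
    by_cases h : c x <;> simp [h, ih]

-- ===== VERDICT (by name: the statement is the Claim_ definition above) =====
theorem penalty_overall_spec : Claim_equal_penalty_overall := by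
  intro graph children solution _
  unfold Spec_penalty_overall penalty_overall penalty_overall_alt
  have hset : solution.foldl
      (fun s cycle => cycle.foldl (fun s node => PySem.Set.add s node) s) PySem.Set.empty
      = solution.foldl (fun s cycle => PySem.Set.update s cycle) PySem.Set.empty := rfl
  simp only [hset, foldlA, foldlB, PySem.List.foldl_add, zero_add]
  set n : Int := (graph.length : Int) with hn
  set R : PySem.Set Int :=
    solution.foldl (fun s cycle => PySem.Set.update s cycle) PySem.Set.empty with hR
  set w : Int → Int := fun i => if children.contains i then (2:Int) else 1 with hw
  have hsplit := sum_if_split (fun i => PySem.Set.contains R i) w (PySem.List.pyRange 0 n 1)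
  have key : ((PySem.List.pyRange 0 n 1).map
        (fun i => if PySem.Set.contains R i then w i else 0)).sum
      = (R.map (fun r => if decide (0 ≤ r ∧ r < n) then w r else 0)).sum := by
    rw [sum_if_filter, sum_if_filter]
    have hperm : ((PySem.List.pyRange 0 n 1).filter (fun i => PySem.Set.contains R i)).Perm
        (R.filter (fun r => decide (0 ≤ r ∧ r < n))) := by
      apply (List.perm_ext_iff_of_nodup _ _).mpr
      · intro x
        simp only [List.mem_filter, PySem.List.mem_pyRange_one, decide_eq_true_eq,
          PySem.Set.contains_iff]
        tauto
      · exact (PySem.List.nodup_pyRange_one 0 n).filter _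
      · exact (nodup_resolved solution PySem.Set.empty List.nodup_nil).filter _
    exact (hperm.map w).sum_eq
  simp only [hw] at hsplit key
  rw [hsplit, key]
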